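-- pv_equiv track=rewrite | github.com/dang3r/dailyProgrammer | 375easy_print_number/test_newnumber.py | solve_int
-- ===== SOURCE A (Python) =====
-- def solve_int(i: int) -> int:
--     if i == 0:
--         return 1
--     ret = 0
--     cnt = 0
--     while i != 0:
--         tmp = (i % 10) + 1
--         i //= 10
--         ret += tmp * 10 ** cnt
--         # Increase exponent if tmp is 10
--         if tmp == 10:
--             cnt += 1
--         cnt += 1
--     return ret
-- ===== SOURCE B (Python) =====
-- def solve_int(i: int) -> int:
--     # Recursive MSB-first decomposition: append the incremented last digit
--     # to the transformed prefix, shifting by 100 when the digit becomes 10.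
--     if i < 10:
--         return i + 1
--     d = i % 10 + 1
--     return solve_int(i // 10) * (100 if d == 10 else 10) + d
-- ===== Notes on version B (the rewrite author's own statement) =====
-- stated objective: simpler
-- what changed: Replaced A's LSB-first while-loop with ret/cnt positional-weight bookkeeping (ret += tmp*10**cnt with an extra cnt bump when a digit maps to 10) by a short MSB-first recursion that multiplies the transformed prefix by 10 (or 100 when the last digit becomes 10) and appends the incremented digit, removing the exponent counter entirely.
import Mathlib
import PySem

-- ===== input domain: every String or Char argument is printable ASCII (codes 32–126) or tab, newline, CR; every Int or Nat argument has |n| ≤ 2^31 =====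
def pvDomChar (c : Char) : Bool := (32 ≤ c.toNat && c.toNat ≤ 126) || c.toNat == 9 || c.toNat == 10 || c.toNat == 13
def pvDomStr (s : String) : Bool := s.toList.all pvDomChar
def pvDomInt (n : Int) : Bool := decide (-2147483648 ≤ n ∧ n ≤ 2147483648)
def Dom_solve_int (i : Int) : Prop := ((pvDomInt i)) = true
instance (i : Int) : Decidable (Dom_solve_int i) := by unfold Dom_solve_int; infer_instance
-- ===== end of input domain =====

-- B replaces A's LSB-first loop with explicit 10^cnt weights by an MSB-first recursion
-- (simpler: no exponent counter). Return-value equivalence is claimed for 0 ≤ i only: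
-- on negative i, Python A's while-loop never terminates (i //= 10 stabilises at -1).

-- ===== PORT A =====
-- A's while-loop over i, ret, cnt; the loop variable is carried as a Nat (i.natAbs)
-- purely for Lean termination — on the claimed domain 0 ≤ i this is the same value,
-- and // and % on nonnegative ints coincide with Nat division/mod.
def solve_int_loop (n : Nat) (ret : Int) (cnt : Nat) : Int :=
  if n = 0 then ret
  else
    let tmp : Int := ((n % 10 : Nat) : Int) + 1
    let ret := ret + tmp * 10 ^ cnt
    let cnt := if tmp = 10 then cnt + 1 else cnt
    solve_int_loop (n / 10) ret (cnt + 1)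

def solve_int (i : Int) : Int :=
  if i = 0 then 1 else solve_int_loop i.natAbs 0 0

-- ===== PORT B =====
def solve_int_alt (i : Int) : Int :=
  if i < 10 then i + 1
  else
    let d := PySem.Int.mod i 10 + 1
    solve_int_alt (PySem.Int.floordiv i 10) * (if d = 10 then 100 else 10) + d
termination_by i.toNat
decreasing_by
  rw [PySem.Int.floordiv_eq_ediv_of_pos (by norm_num : (0:Int) < 10)]
  omega

-- ===== PRECONDITION & SPEC =====
-- Pre_ excludes negative i: there Python A loops forever (returns nothing).
def Pre_solve_int (i : Int) : Prop := 0 ≤ i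
instance (i : Int) : Decidable (Pre_solve_int i) := by unfold Pre_solve_int; infer_instance
def pvWitness_solve_int : Int := (42)

def Spec_solve_int (i : Int) (out : Int) : Prop := out = solve_int_alt i
instance (i : Int) (out : Int) : Decidable (Spec_solve_int i out) := by unfold Spec_solve_int; infer_instance

-- ===== CLAIM (what is proved, stated in full; the proofs are below) =====
def Claim_equal_solve_int : Prop := ∀ (i : Int), Dom_solve_int i → Pre_solve_int i → Spec_solve_int i (solve_int i)

-- ===== LEMMAS AND PROOFS =====

lemma solve_int_alt_small (i : Int) (h : i < 10) : solve_int_alt i = i + 1 := by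
  rw [solve_int_alt]; simp [h]

lemma solve_int_alt_step (i : Int) (h : ¬ i < 10) :
    solve_int_alt i =
      solve_int_alt (PySem.Int.floordiv i 10) *
        (if PySem.Int.mod i 10 + 1 = 10 then 100 else 10) + (PySem.Int.mod i 10 + 1) := by
  rw [solve_int_alt]; simp [h]

lemma solve_int_loop_eq (n : Nat) (hn : n ≠ 0) :
    ∀ (ret : Int) (cnt : Nat),
      solve_int_loop n ret cnt = ret + solve_int_alt (n : Int) * 10 ^ cnt := by
  induction n using Nat.strong_induction_on with
  | _ n ih =>
    intro ret cnt
    rw [solve_int_loop]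
    simp only [hn, if_false]
    by_cases hsmall : n < 10
    · have h10 : n / 10 = 0 := Nat.div_eq_of_lt hsmall
      have hmod : n % 10 = n := Nat.mod_eq_of_lt hsmall
      rw [h10, solve_int_loop]
      simp only [if_true, hmod]
      rw [solve_int_alt_small (n : Int) (by exact_mod_cast hsmall)]
    · have hq : n / 10 ≠ 0 := by omega
      rw [ih (n / 10) (by omega) hq]
      rw [solve_int_alt_step (n : Int) (by exact_mod_cast hsmall)]
      have hm : PySem.Int.mod (n : Int) 10 = ((n % 10 : Nat) : Int) := by
        exact_mod_cast PySem.Int.mod_natCast n 10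
      have hd : PySem.Int.floordiv (n : Int) 10 = ((n / 10 : Nat) : Int) := by
        exact_mod_cast PySem.Int.floordiv_natCast n 10
      rw [hm, hd]
      by_cases h9 : ((n % 10 : Nat) : Int) + 1 = 10
      · simp only [h9, if_true]
        ring
      · simp only [h9, if_false]
        ring

-- ===== VERDICT (by name: the statement is the Claim_ definition above) =====
theorem solve_int_spec : Claim_equal_solve_int := by
  intro i _ hpre
  unfold Spec_solve_int solve_int
  by_cases h0 : i = 0
  · subst h0
    simp [solve_int_alt_small 0 (by norm_num)]
  · simp only [h0, if_false]
    have hna : (i.natAbs : Int) = i := Int.natAbs_of_nonneg hpre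
    have := solve_int_loop_eq i.natAbs (by omega) 0 0
    rw [hna] at this
    simpa using this
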